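-- pv_equiv track=rewrite | github.com/hherb/medscraper | pubmed.py | screen_publications_by_keywords
-- ===== SOURCE A (Python) =====
-- def screen_publications_by_keywords(publications, keywords):
-- 	"""
-- 	Screens a list of publications for specified keywords in the title or abstract.
--
-- 	:param publications: List of publication dicts fetched from the medRxiv API.
-- 	:param keywords: List of keywords to search for in the title and abstract.
-- 	:return: List of publication dicts that contain any of the keywords in their title or abstract.
-- 	"""
-- 	filtered_publications = []
-- 	keywords_lower = [keyword.lower() for keyword in keywords]
--
-- 	for publication in publications:
-- 		title = publication.get('title', '').lower()
-- 		abstract = publication.get('abstract', '').lower()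
--
-- 		# Check if any of the keywords appear in the title or abstract
-- 		if any(keyword in title or keyword in abstract for keyword in keywords_lower):
-- 			filtered_publications.append(publication)
--
-- 	return filtered_publications
-- ===== SOURCE B (Python) =====
-- def screen_publications_by_keywords(publications, keywords):
-- 	"""Keyword-outer screening: lowercase each publication's title/abstract once,
-- 	then sweep each keyword over a shrinking pool of not-yet-matched publications."""
-- 	pool = []
-- 	for i, pub in enumerate(publications):
-- 		pool.append((i, pub.get('title', '').lower(), pub.get('abstract', '').lower()))
-- 	matched = set()
-- 	for keyword in keywords:
-- 		k = keyword.lower()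
-- 		still = []
-- 		for entry in pool:
-- 			i, title, abstract = entry
-- 			if k in title or k in abstract:
-- 				matched.add(i)
-- 			else:
-- 				still.append(entry)
-- 		pool = still
-- 	return [pub for i, pub in enumerate(publications) if i in matched]
-- ===== Notes on version B (the rewrite author's own statement) =====
-- stated objective: alternative
-- what changed: Inverted the loop nesting: instead of A's per-publication scan over all keywords, B lowercases every title/abstract once, then sweeps each keyword over a shrinking pool of not-yet-matched publications, collecting matched indices in a set and rebuilding the output by index.
import Mathlib
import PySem

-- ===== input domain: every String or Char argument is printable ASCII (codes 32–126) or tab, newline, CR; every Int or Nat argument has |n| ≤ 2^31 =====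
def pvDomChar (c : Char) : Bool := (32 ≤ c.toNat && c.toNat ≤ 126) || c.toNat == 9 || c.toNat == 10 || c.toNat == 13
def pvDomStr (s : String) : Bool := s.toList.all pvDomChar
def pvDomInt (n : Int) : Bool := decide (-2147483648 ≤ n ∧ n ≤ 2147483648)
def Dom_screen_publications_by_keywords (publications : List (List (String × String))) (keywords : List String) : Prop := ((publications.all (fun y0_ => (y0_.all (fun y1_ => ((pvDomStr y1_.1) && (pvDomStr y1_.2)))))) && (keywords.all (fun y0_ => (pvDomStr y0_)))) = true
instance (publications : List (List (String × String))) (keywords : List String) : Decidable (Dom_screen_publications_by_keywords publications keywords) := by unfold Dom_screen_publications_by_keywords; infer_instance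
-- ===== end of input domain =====

-- B screens keyword-outer over a shrinking pool of not-yet-matched publications (indices into a set),
-- instead of A's publication-outer any-keyword scan; same return value, alternative structure.


-- shared dict-lookup helper: publication.get(key, default) on an association list (first match)
def pubGetD (pub : List (String × String)) (key : String) (dflt : String) : String :=
  match pub.find? (fun p => p.1 == key) with
  | some p => p.2
  | none => dflt

-- ===== PORT A =====
def screen_publications_by_keywords (publications : List (List (String × String))) (keywords : List String) : List (List (String × String)) :=
  let keywords_lower := keywords.map PySem.Str.lower
  publications.foldl (fun filtered_publications publication =>
    let title := PySem.Str.lower (pubGetD publication "title" "")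
    let abstract := PySem.Str.lower (pubGetD publication "abstract" "")
    if keywords_lower.any (fun keyword => PySem.Str.isIn keyword title || PySem.Str.isIn keyword abstract)
    then filtered_publications ++ [publication]
    else filtered_publications) []

-- ===== PORT B =====
def screen_publications_by_keywords_alt (publications : List (List (String × String))) (keywords : List String) : List (List (String × String)) :=
  let pool : List (Int × String × String) :=
    (PySem.List.enumerate publications).map (fun p =>
      (p.1, PySem.Str.lower (pubGetD p.2 "title" ""), PySem.Str.lower (pubGetD p.2 "abstract" "")))
  let st := keywords.foldl (fun st keyword =>
      let k := PySem.Str.lower keyword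
      st.2.foldl (fun st2 entry =>
          if PySem.Str.isIn k entry.2.1 || PySem.Str.isIn k entry.2.2
          then (PySem.Set.add st2.1 entry.1, st2.2)
          else (st2.1, st2.2 ++ [entry]))
        (st.1, ([] : List (Int × String × String))))
    ((PySem.Set.empty : PySem.Set Int), pool)
  ((PySem.List.enumerate publications).filter (fun p => PySem.Set.contains st.1 p.1)).map (fun p => p.2)

-- ===== PRECONDITION & SPEC =====
def Spec_screen_publications_by_keywords (publications : List (List (String × String))) (keywords : List String) (out : List (List (String × String))) : Prop := out = screen_publications_by_keywords_alt publications keywords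
instance (publications : List (List (String × String))) (keywords : List String) (out : List (List (String × String))) : Decidable (Spec_screen_publications_by_keywords publications keywords out) := by unfold Spec_screen_publications_by_keywords; infer_instance

-- ===== CLAIM (what is proved, stated in full; the proofs are below) =====
def Claim_equal_screen_publications_by_keywords : Prop := ∀ (publications : List (List (String × String))) (keywords : List String), Dom_screen_publications_by_keywords publications keywords → Spec_screen_publications_by_keywords publications keywords (screen_publications_by_keywords publications keywords)

-- ===== LEMMAS AND PROOFS =====

-- does lowered keyword k hit a pool entry (index, lowered title, lowered abstract)?
def pvHit (k : String) (e : Int × String × String) : Bool :=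
  PySem.Str.isIn k e.2.1 || PySem.Str.isIn k e.2.2

-- the pool entry built from an enumerated publication
def pvEntry (p : Int × List (String × String)) : Int × String × String :=
  (p.1, PySem.Str.lower (pubGetD p.2 "title" ""), PySem.Str.lower (pubGetD p.2 "abstract" ""))

-- A's per-publication predicate
def pvPred (keywords : List String) (publication : List (String × String)) : Bool :=
  (keywords.map PySem.Str.lower).any (fun keyword =>
    PySem.Str.isIn keyword (PySem.Str.lower (pubGetD publication "title" "")) ||
    PySem.Str.isIn keyword (PySem.Str.lower (pubGetD publication "abstract" "")))

-- B's inner-loop step and outer loop, named for the proofs (definitionally equal to the port's lambdas)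
def pvStep (k : String) (st2 : PySem.Set Int × List (Int × String × String))
    (entry : Int × String × String) : PySem.Set Int × List (Int × String × String) :=
  if pvHit k entry then (PySem.Set.add st2.1 entry.1, st2.2) else (st2.1, st2.2 ++ [entry])

def pvOuter (keywords : List String) (st : PySem.Set Int × List (Int × String × String)) :
    PySem.Set Int × List (Int × String × String) :=
  keywords.foldl (fun st keyword =>
    st.2.foldl (pvStep (PySem.Str.lower keyword)) (st.1, ([] : List (Int × String × String)))) st

lemma alt_eq_pv (publications : List (List (String × String))) (keywords : List String) :
    screen_publications_by_keywords_alt publications keywords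
      = ((PySem.List.enumerate publications).filter (fun p =>
          PySem.Set.contains (pvOuter keywords ((PySem.Set.empty : PySem.Set Int),
            (PySem.List.enumerate publications).map pvEntry)).1 p.1)).map (fun p => p.2) := rfl

lemma a_eq_pv (publications : List (List (String × String))) (keywords : List String) :
    screen_publications_by_keywords publications keywords
      = publications.foldl (fun acc pub => if pvPred keywords pub then acc ++ [id pub] else acc) [] := rfl

lemma inner_fold (k : String) (pool : List (Int × String × String))
    (m : PySem.Set Int) (acc : List (Int × String × String)) :
    pool.foldl (pvStep k) (m, acc)
    = ((pool.filter (pvHit k)).foldl (fun s e => PySem.Set.add s e.1) m,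
       acc ++ pool.filter (fun e => !pvHit k e)) := by
  induction pool generalizing m acc with
  | nil => simp
  | cons e rest ih =>
    by_cases h : pvHit k e = true
    · rw [List.foldl_cons, pvStep, if_pos h, ih, List.filter_cons, List.filter_cons]
      simp [h]
    · rw [List.foldl_cons, pvStep, if_neg h, ih, List.filter_cons, List.filter_cons]
      simp [h]

lemma mem_addAll (pool : List (Int × String × String)) (m : PySem.Set Int) (i : Int) :
    (i ∈ pool.foldl (fun s e => PySem.Set.add s e.1) m) ↔ (i ∈ m ∨ ∃ e ∈ pool, e.1 = i) := by
  induction pool generalizing m with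
  | nil => simp
  | cons e rest ih =>
    simp [List.foldl_cons, ih, PySem.Set.mem_add]
    tauto

lemma outer_fold (keywords : List String) (m : PySem.Set Int)
    (pool : List (Int × String × String)) (i : Int) :
    (i ∈ (pvOuter keywords (m, pool)).1)
    ↔ (i ∈ m ∨ ∃ e ∈ pool, e.1 = i ∧ keywords.any (fun kw => pvHit (PySem.Str.lower kw) e)) := by
  induction keywords generalizing m pool with
  | nil => simp [pvOuter]
  | cons kw rest ih =>
    rw [pvOuter, List.foldl_cons]
    simp only []
    rw [inner_fold]
    rw [show ∀ st, List.foldl (fun (st : PySem.Set Int × List (Int × String × String)) keyword =>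
          st.2.foldl (pvStep (PySem.Str.lower keyword)) (st.1, ([] : List (Int × String × String)))) st rest
        = pvOuter rest st from fun _ => rfl]
    rw [ih, mem_addAll]
    constructor
    · rintro ((hm | ⟨e, he, hei⟩) | ⟨e, he, hei, hany⟩)
      · exact Or.inl hm
      · simp at he
        exact Or.inr ⟨e, he.1, hei, by simp [he.2]⟩
      · simp at he
        exact Or.inr ⟨e, he.1, hei, by simp [he.2, hany]⟩
    · rintro (hm | ⟨e, he, hei, hany⟩)
      · exact Or.inl (Or.inl hm)
      · simp at hany
        rcases hany with h1 | h2
        · exact Or.inl (Or.inr ⟨e, by simp [he, h1], hei⟩)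
        · by_cases hk : pvHit (PySem.Str.lower kw) e = true
          · exact Or.inl (Or.inr ⟨e, by simp [he, hk], hei⟩)
          · exact Or.inr ⟨e, by simp [he, hk], hei, by simpa using h2⟩

-- B's final membership test equals A's predicate, pointwise on enumerated publications
lemma contains_iff (publications : List (List (String × String))) (keywords : List String)
    (p : Int × List (String × String)) (hp : p ∈ PySem.List.enumerate publications) :
    (PySem.Set.contains (pvOuter keywords ((PySem.Set.empty : PySem.Set Int),
        (PySem.List.enumerate publications).map pvEntry)).1 p.1)
    = pvPred keywords p.2 := by
  have hc : ∀ (s : PySem.Set Int) (x : Int), PySem.Set.contains s x = decide (x ∈ s) := by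
    intro s x
    simp [PySem.Set.contains]
  have hpred : pvPred keywords p.2 = keywords.any (fun kw => pvHit (PySem.Str.lower kw) (pvEntry p)) := by
    simp [pvPred, pvHit, pvEntry, List.any_map, Function.comp_def]
  rw [hc, Bool.eq_iff_iff]
  simp only [decide_eq_true_eq]
  rw [outer_fold, hpred]
  constructor
  · rintro (h | ⟨e, he, hei, hany⟩)
    · simp [PySem.Set.empty] at h
    · simp only [List.mem_map] at he
      obtain ⟨q, hq, rfl⟩ := he
      rw [PySem.List.mem_enumerate_iff] at hp hq
      obtain ⟨kp, hkp, rfl⟩ := hp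
      obtain ⟨kq, hkq, rfl⟩ := hq
      simp only [pvEntry] at hei
      have : kq = kp := by omega
      subst this
      exact hany
  · intro h
    exact Or.inr ⟨pvEntry p, List.mem_map_of_mem hp, rfl, h⟩

lemma filter_enumerate_map (publications : List (List (String × String)))
    (q : List (String × String) → Bool) (s : Int) :
    ((PySem.List.enumerate publications s).filter (fun p => q p.2)).map (fun p => p.2)
      = publications.filter q := by
  induction publications generalizing s with
  | nil => simp [PySem.List.enumerate]
  | cons x xs ih =>
    rw [PySem.List.enumerate_cons]
    by_cases h : q x = true
    · simp [h, ih]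
    · simp at h
      simp [h, ih]

-- ===== VERDICT (by name: the statement is the Claim_ definition above) =====
theorem screen_publications_by_keywords_spec : Claim_equal_screen_publications_by_keywords := by
  intro publications keywords _
  unfold Spec_screen_publications_by_keywords
  rw [a_eq_pv, alt_eq_pv]
  rw [PySem.List.foldl_append_if (pvPred keywords) id]
  rw [List.filter_congr (fun p hp => contains_iff publications keywords p hp)]
  rw [filter_enumerate_map publications (pvPred keywords) 0]
  simp
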